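-- pv_equiv track=rewrite | github.com/iproha94/contests | 1144/d.py | _f
-- ===== SOURCE A (Python) =====
-- def _f(n, arr):
--     number_count_map = {}
--     for a in arr:
--         if number_count_map.get(a, None) is None:
--             number_count_map[a] = 1
--         else:
--             number_count_map[a] += 1
--
--     max_number = list(number_count_map.keys())[0]
--     for dict_key in list(number_count_map.keys()):
--         if number_count_map[dict_key] > number_count_map[max_number]:
--             max_number = dict_key
--
--     empties = []
--     if arr[0] != max_number:
--         empties.append([0, 0])
--
--     for i in range(1, len(arr)):
--         if arr[i] == max_number and arr[i - 1] != max_number: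
--             empties[-1][1] = i - 1
--         elif arr[i] != max_number and arr[i - 1] != max_number:
--             empties[-1][1] = i
--         elif arr[i] != max_number and arr[i - 1] == max_number:
--             empties.append([i, i])
--
--     result = []
--     for e in empties:
--         if e[1] != len(arr) - 1:
--             for i in reversed(range(e[0], e[1] + 1)):
--                 if arr[i] > max_number:
--                     result.append((2, i + 1, i + 2))
--                 elif arr[i] < max_number:
--                     result.append((1, i + 1, i + 2))
--         else:
--             for i in range(e[0], e[1] + 1):
--                 if arr[i] > max_number:
--                     result.append((2, i + 1, i))
--                 elif arr[i] < max_number: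
--                     result.append((1, i + 1, i))
--
--     return result
-- ===== SOURCE B (Python) =====
-- def _f(n, arr):
--     counts = {}
--     for a in arr:
--         counts[a] = counts.get(a, 0) + 1
--     m = max(counts, key=counts.get)
--     result = []
--     run = []
--     for i, a in enumerate(arr):
--         if a == m:
--             for j in reversed(run):
--                 result.append((2 if arr[j] > m else 1, j + 1, j + 2))
--             run = []
--         else:
--             run.append(i)
--     for j in run:
--         result.append((2 if arr[j] > m else 1, j + 1, j))
--     return result
-- ===== Notes on version B (the rewrite author's own statement) =====
-- stated objective: simpler
-- what changed: B replaces A's two-phase pipeline (a successor-comparison state machine that builds [start,end] run intervals by mutating the last interval, then a second loop emitting operations per interval) with a single pass over enumerate(arr) that accumulates the indices of the current non-max run and flushes it (reversed, target i+2) whenever the dominant element is met, emitting the trailing run forward (target i) at the end; the frequency map is built with dict.get and the dominant element taken by max(counts, key=counts.get).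
import Mathlib
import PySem

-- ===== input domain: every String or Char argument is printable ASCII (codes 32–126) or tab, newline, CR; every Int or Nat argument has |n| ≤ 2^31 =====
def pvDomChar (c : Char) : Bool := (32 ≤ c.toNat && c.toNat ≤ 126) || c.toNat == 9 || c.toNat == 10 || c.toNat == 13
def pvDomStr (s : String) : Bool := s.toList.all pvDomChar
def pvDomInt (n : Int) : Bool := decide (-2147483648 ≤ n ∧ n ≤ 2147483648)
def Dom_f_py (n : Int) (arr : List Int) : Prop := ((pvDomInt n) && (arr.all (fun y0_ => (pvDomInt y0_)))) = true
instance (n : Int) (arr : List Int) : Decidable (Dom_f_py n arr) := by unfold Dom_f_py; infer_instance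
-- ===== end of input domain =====

-- B replaces A's two-phase run-interval state machine by a single pass with a run accumulator
-- flushed at each dominant element (objective: simpler); equal return value on every nonempty arr.

-- ===== PORT A =====
-- empties[-1][1] = v  (on an empty list Python would raise IndexError; in _f this line only
-- runs when empties is nonempty, so the [] case below is unreachable on admitted inputs)
def pvSetLast (es : List (Int × Int)) (v : Int) : List (Int × Int) :=
  match es with
  | [] => []
  | [p] => [(p.1, v)]
  | p :: rest => p :: pvSetLast rest v

def f_py (n : Int) (arr : List Int) : List (Int × Int × Int) :=
  let ncm : PySem.Dict Int Int :=
    arr.foldl (fun d a =>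
      match d.get? a with
      | none => d.insert a 1
      | some c => d.insert a (c + 1)) PySem.Dict.empty
  -- list(number_count_map.keys())[0]: IndexError when arr = [] (excluded by Pre_f_py)
  match PySem.List.pyGet? ncm.keys 0 with
  | none => []
  | some k0 =>
    let maxNumber := ncm.keys.foldl (fun mx k => if ncm.getD k 0 > ncm.getD mx 0 then k else mx) k0
    -- all remaining index accesses arr[i] are in range, so pyGetD is exact here
    let empties0 : List (Int × Int) :=
      if PySem.List.pyGetD arr 0 0 ≠ maxNumber then [(0, 0)] else []
    let empties := (PySem.List.pyRange 1 (arr.length : Int)).foldl (fun es i =>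
      if PySem.List.pyGetD arr i 0 = maxNumber ∧ PySem.List.pyGetD arr (i - 1) 0 ≠ maxNumber then
        pvSetLast es (i - 1)
      else if PySem.List.pyGetD arr i 0 ≠ maxNumber ∧ PySem.List.pyGetD arr (i - 1) 0 ≠ maxNumber then
        pvSetLast es i
      else if PySem.List.pyGetD arr i 0 ≠ maxNumber ∧ PySem.List.pyGetD arr (i - 1) 0 = maxNumber then
        es ++ [(i, i)]
      else es) empties0
    empties.foldl (fun res e =>
      if e.2 ≠ (arr.length : Int) - 1 then
        ((PySem.List.pyRange e.1 (e.2 + 1)).reverse).foldl (fun r i =>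
          if PySem.List.pyGetD arr i 0 > maxNumber then r ++ [(2, i + 1, i + 2)]
          else if PySem.List.pyGetD arr i 0 < maxNumber then r ++ [(1, i + 1, i + 2)]
          else r) res
      else
        (PySem.List.pyRange e.1 (e.2 + 1)).foldl (fun r i =>
          if PySem.List.pyGetD arr i 0 > maxNumber then r ++ [(2, i + 1, i)]
          else if PySem.List.pyGetD arr i 0 < maxNumber then r ++ [(1, i + 1, i)]
          else r) res) []

-- ===== PORT B =====
def f_py_alt (n : Int) (arr : List Int) : List (Int × Int × Int) :=
  let counts : PySem.Dict Int Int :=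
    arr.foldl (fun d a => d.insert a (d.getD a 0 + 1)) PySem.Dict.empty
  -- max(counts, key=counts.get): ValueError when arr = [] (excluded by Pre_f_py)
  match PySem.List.max? counts.keys (fun k => counts.getD k 0) with
  | none => []
  | some m =>
    let st := (PySem.List.enumerate arr).foldl
      (fun (p : List (Int × Int × Int) × List Int) ia =>
        if ia.2 = m then
          (p.1 ++ p.2.reverse.map (fun j =>
            ((if PySem.List.pyGetD arr j 0 > m then (2 : Int) else 1), j + 1, j + 2)), [])
        else (p.1, p.2 ++ [ia.1])) ([], [])
    st.1 ++ st.2.map (fun j => ((if PySem.List.pyGetD arr j 0 > m then (2 : Int) else 1), j + 1, j))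

-- ===== PRECONDITION & SPEC =====
-- On arr = [] the Python A raises IndexError (and B raises ValueError); nothing else is excluded.
def Pre_f_py (n : Int) (arr : List Int) : Prop := arr ≠ []
instance (n : Int) (arr : List Int) : Decidable (Pre_f_py n arr) := by unfold Pre_f_py; infer_instance

def pvWitness_f_py : Int × List Int := (4, [2, 1, 1, 3])

def Spec_f_py (n : Int) (arr : List Int) (out : List (Int × Int × Int)) : Prop := out = f_py_alt n arr
instance (n : Int) (arr : List Int) (out : List (Int × Int × Int)) : Decidable (Spec_f_py n arr out) := by unfold Spec_f_py; infer_instance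

-- ===== CLAIM (what is proved, stated in full; the proofs are below) =====
def Claim_equal_f_py : Prop := ∀ (n : Int) (arr : List Int), Dom_f_py n arr → Pre_f_py n arr → Spec_f_py n arr (f_py n arr)

-- ===== LEMMAS AND PROOFS =====

-- The operation emitted for index i (both programs agree on it whenever arr[i] ≠ m).
def pvOp (arr : List Int) (m i : Int) : Int :=
  if PySem.List.pyGetD arr i 0 > m then 2 else 1

-- Interior-run emission (reversed, target i+2).
def pvEmitI (arr : List Int) (m : Int) (e : Int × Int) : List (Int × Int × Int) :=
  ((PySem.List.pyRange e.1 (e.2 + 1)).reverse).map (fun i => (pvOp arr m i, i + 1, i + 2))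

def pvEmitAll (arr : List Int) (m : Int) (C : List (Int × Int)) : List (Int × Int × Int) :=
  C.flatMap (pvEmitI arr m)

-- A's run-building step (the body of A's second loop), and its state after k steps.
def pvStepA (arr : List Int) (m : Int) (es : List (Int × Int)) (i : Int) : List (Int × Int) :=
  if PySem.List.pyGetD arr i 0 = m ∧ PySem.List.pyGetD arr (i - 1) 0 ≠ m then
    pvSetLast es (i - 1)
  else if PySem.List.pyGetD arr i 0 ≠ m ∧ PySem.List.pyGetD arr (i - 1) 0 ≠ m then
    pvSetLast es i
  else if PySem.List.pyGetD arr i 0 ≠ m ∧ PySem.List.pyGetD arr (i - 1) 0 = m then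
    es ++ [(i, i)]
  else es

def pvStateA (arr : List Int) (m : Int) (k : Nat) : List (Int × Int) :=
  (PySem.List.pyRange 1 (k : Int)).foldl (pvStepA arr m)
    (if PySem.List.pyGetD arr 0 0 ≠ m then [(0, 0)] else [])

-- B's step, and its state after the first k elements.
def pvStepB (arr : List Int) (m : Int) (p : List (Int × Int × Int) × List Int)
    (ia : Int × Int) : List (Int × Int × Int) × List Int :=
  if ia.2 = m then
    (p.1 ++ p.2.reverse.map (fun j =>
      ((if PySem.List.pyGetD arr j 0 > m then (2 : Int) else 1), j + 1, j + 2)), [])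
  else (p.1, p.2 ++ [ia.1])

def pvStateB (arr : List Int) (m : Int) (k : Nat) : List (Int × Int × Int) × List Int :=
  ((PySem.List.enumerate arr).take k).foldl (pvStepB arr m) ([], [])

-- Goodness of a list of closed runs after k steps.
def pvGood (arr : List Int) (m : Int) (k : Nat) (C : List (Int × Int)) : Prop :=
  ∀ e ∈ C, 0 ≤ e.1 ∧ e.1 ≤ e.2 ∧ e.2 ≤ (k : Int) - 2 ∧
    ∀ j : Int, e.1 ≤ j → j ≤ e.2 → PySem.List.pyGetD arr j 0 ≠ m

-- The joint loop invariant after k steps (1 ≤ k ≤ arr.length).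
def pvInv (arr : List Int) (m : Int) (k : Nat) : Prop :=
  (PySem.List.pyGetD arr ((k : Int) - 1) 0 ≠ m →
    ∃ C s, pvStateA arr m k = C ++ [(s, (k : Int) - 1)] ∧
      pvStateB arr m k = (pvEmitAll arr m C, PySem.List.pyRange s (k : Int)) ∧
      pvGood arr m k C ∧ 0 ≤ s ∧ s ≤ (k : Int) - 1 ∧
      (∀ j : Int, s ≤ j → j ≤ (k : Int) - 1 → PySem.List.pyGetD arr j 0 ≠ m)) ∧
  (PySem.List.pyGetD arr ((k : Int) - 1) 0 = m →
    pvStateB arr m k = (pvEmitAll arr m (pvStateA arr m k), []) ∧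
    pvGood arr m k (pvStateA arr m k))

theorem pvSetLast_append (C : List (Int × Int)) (p : Int × Int) (v : Int) :
    pvSetLast (C ++ [p]) v = C ++ [(p.1, v)] := by
  induction C with
  | nil => rfl
  | cons c cs ih =>
    cases cs with
    | nil => simp [pvSetLast]
    | cons c' cs' => simpa [pvSetLast] using ih

theorem pvEmitAll_append (arr : List Int) (m : Int) (C : List (Int × Int)) (e : Int × Int) :
    pvEmitAll arr m (C ++ [e]) = pvEmitAll arr m C ++ pvEmitI arr m e := by
  simp [pvEmitAll]

-- max(xs, key) as Python computes it: first maximal element, running strict-greater fold.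
theorem pv_max?_eq_foldl {α κ : Type} [LinearOrder κ] (l : List α) (k0 : α) (rest : List α)
    (h : l = k0 :: rest) (key : α → κ) :
    PySem.List.max? l key =
      some (l.foldl (fun mx x => if key mx < key x then x else mx) k0) := by
  subst h
  have aux : ∀ (t : List α) (a : α),
      t.foldl (fun acc x => match acc with
        | none => some x
        | some m => if key m < key x then some x else some m) (some a) =
      some (t.foldl (fun mx x => if key mx < key x then x else mx) a) := by
    intro t
    induction t with
    | nil => intro a; rfl
    | cons x xs ih =>
      intro a
      simp only [List.foldl_cons]
      by_cases hlt : key a < key x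
      · simp [hlt, ih]
      · simp [hlt, ih]
  simp only [PySem.List.max?, List.foldl_cons]
  have h0 : (if key k0 < key k0 then k0 else k0) = k0 := by simp
  rw [h0]
  exact aux rest k0

-- pyGetD at a natural-number index is the list element.
theorem pvGet_nat (arr : List Int) (k : Nat) (hk : k < arr.length) :
    PySem.List.pyGetD arr (k : Int) 0 = arr[k] := by
  rw [PySem.List.pyGetD_eq_getElem arr 0 (by positivity) (by exact_mod_cast hk)]
  simp

theorem pvGet_zero (a : Int) (t : List Int) : PySem.List.pyGetD (a :: t) 0 0 = a := by
  rw [PySem.List.pyGetD_eq_getElem (a :: t) 0 le_rfl (by simp)]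
  rfl

-- A's three-way emission fold over a run of non-max indices, reversed form.
theorem pvFold3_rev (arr : List Int) (m : Int) (e : Int × Int)
    (res : List (Int × Int × Int))
    (hall : ∀ i : Int, e.1 ≤ i → i ≤ e.2 → PySem.List.pyGetD arr i 0 ≠ m) :
    ((PySem.List.pyRange e.1 (e.2 + 1)).reverse).foldl (fun r i =>
      if PySem.List.pyGetD arr i 0 > m then r ++ [(2, i + 1, i + 2)]
      else if PySem.List.pyGetD arr i 0 < m then r ++ [(1, i + 1, i + 2)]
      else r) res = res ++ pvEmitI arr m e := by
  unfold pvEmitI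
  rw [PySem.List.foldl_congr_mem' _ _
      (fun r i => r ++ [(pvOp arr m i, i + 1, i + 2)]) res ?_]
  · exact PySem.List.foldl_append_singleton_eq_map _ _ res
  · intro i hi r
    have hrange := PySem.List.mem_pyRange_one.mp (List.mem_reverse.mp hi)
    have hnem := hall i hrange.1 (by omega)
    unfold pvOp
    dsimp only
    by_cases hgt : PySem.List.pyGetD arr i 0 > m
    · simp [hgt]
    · have hlt : PySem.List.pyGetD arr i 0 < m := by omega
      simp [hgt, hlt]

-- Forward form (trailing run; target component is i).
theorem pvFold3_fwd (arr : List Int) (m : Int) (e : Int × Int)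
    (res : List (Int × Int × Int))
    (hall : ∀ i : Int, e.1 ≤ i → i ≤ e.2 → PySem.List.pyGetD arr i 0 ≠ m) :
    (PySem.List.pyRange e.1 (e.2 + 1)).foldl (fun r i =>
      if PySem.List.pyGetD arr i 0 > m then r ++ [(2, i + 1, i)]
      else if PySem.List.pyGetD arr i 0 < m then r ++ [(1, i + 1, i)]
      else r) res =
      res ++ (PySem.List.pyRange e.1 (e.2 + 1)).map (fun i => (pvOp arr m i, i + 1, i)) := by
  rw [PySem.List.foldl_congr_mem' _ _
      (fun r i => r ++ [(pvOp arr m i, i + 1, i)]) res ?_]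
  · exact PySem.List.foldl_append_singleton_eq_map _ _ res
  · intro i hi r
    have hrange := PySem.List.mem_pyRange_one.mp hi
    have hnem := hall i hrange.1 (by omega)
    unfold pvOp
    dsimp only
    by_cases hgt : PySem.List.pyGetD arr i 0 > m
    · simp [hgt]
    · have hlt : PySem.List.pyGetD arr i 0 < m := by omega
      simp [hgt, hlt]

-- A's whole emission loop over a list of interior runs.
theorem pvFoldEmitC (arr : List Int) (m : Int) (C : List (Int × Int))
    (res : List (Int × Int × Int))
    (h : ∀ e ∈ C, e.2 ≠ (arr.length : Int) - 1 ∧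
      ∀ j : Int, e.1 ≤ j → j ≤ e.2 → PySem.List.pyGetD arr j 0 ≠ m) :
    C.foldl (fun res e =>
      if e.2 ≠ (arr.length : Int) - 1 then
        ((PySem.List.pyRange e.1 (e.2 + 1)).reverse).foldl (fun r i =>
          if PySem.List.pyGetD arr i 0 > m then r ++ [(2, i + 1, i + 2)]
          else if PySem.List.pyGetD arr i 0 < m then r ++ [(1, i + 1, i + 2)]
          else r) res
      else
        (PySem.List.pyRange e.1 (e.2 + 1)).foldl (fun r i =>
          if PySem.List.pyGetD arr i 0 > m then r ++ [(2, i + 1, i)]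
          else if PySem.List.pyGetD arr i 0 < m then r ++ [(1, i + 1, i)]
          else r) res) res = res ++ pvEmitAll arr m C := by
  rw [PySem.List.foldl_congr_mem' C _ (fun res e => res ++ pvEmitI arr m e) res ?_]
  · unfold pvEmitAll
    exact PySem.List.foldl_append_eq_flatMap _ C res
  · intro e he acc
    obtain ⟨h1, h2⟩ := h e he
    rw [if_pos h1]
    exact pvFold3_rev arr m e acc h2

theorem pvStateA_succ (arr : List Int) (m : Int) (k : Nat) (hk : 1 ≤ k) :
    pvStateA arr m (k + 1) = pvStepA arr m (pvStateA arr m k) (k : Int) := by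
  unfold pvStateA
  rw [show ((k + 1 : Nat) : Int) = (k : Int) + 1 by push_cast; ring]
  rw [PySem.List.pyRange_one_succ_right (by exact_mod_cast hk)]
  rw [List.foldl_append]
  rfl

theorem pvStateB_succ (arr : List Int) (m : Int) (k : Nat) (hk : k < arr.length) :
    pvStateB arr m (k + 1) = pvStepB arr m (pvStateB arr m k) ((k : Int), arr[k]) := by
  unfold pvStateB
  rw [List.take_add_one, PySem.List.getElem?_enumerate arr 0 k, List.getElem?_eq_getElem hk]
  simp [List.foldl_append]

-- Inductive proof of the invariant.
theorem pvInv_holds (arr : List Int) (m : Int) (hne : arr ≠ []) :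
    ∀ k : Nat, 1 ≤ k → k ≤ arr.length → pvInv arr m k := by
  intro k hk
  induction k, hk using Nat.le_induction with
  | base =>
    intro _hlen
    obtain ⟨a, t, rfl⟩ := List.exists_cons_of_ne_nil hne
    have hc1 : ((1 : Nat) : Int) - 1 = 0 := by norm_num
    have hSA : pvStateA (a :: t) m 1 =
        (if PySem.List.pyGetD (a :: t) 0 0 ≠ m then [(0, 0)] else []) := by
      unfold pvStateA
      rw [PySem.List.pyRange_one_eq_nil (by norm_num)]
      rfl
    have hSB : pvStateB (a :: t) m 1 = pvStepB (a :: t) m ([], []) (0, a) := by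
      unfold pvStateB
      rw [PySem.List.enumerate_cons]
      rfl
    unfold pvInv
    rw [hc1, pvGet_zero]
    constructor
    · intro hne0
      refine ⟨[], 0, ?_, ?_, ?_, le_rfl, by norm_num, ?_⟩
      · rw [hSA, if_pos (by rw [pvGet_zero]; exact hne0)]
        simp
      · rw [hSB]
        unfold pvStepB
        rw [if_neg (show ¬ ((0 : Int), a).2 = m from hne0)]
        rw [show ((1 : Nat) : Int) = 0 + 1 by norm_num, PySem.List.pyRange_one_singleton]
        simp [pvEmitAll]
      · intro e he
        simp at he
      · intro j hj1 hj2
        have hj : j = 0 := by omega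
        rw [hj, pvGet_zero]
        exact hne0
    · intro heq
      have hSA' : pvStateA (a :: t) m 1 = [] := by
        rw [hSA, if_neg (by rw [pvGet_zero]; exact not_not_intro heq)]
      constructor
      · rw [hSB, hSA']
        unfold pvStepB
        rw [if_pos (show ((0 : Int), a).2 = m from heq)]
        simp [pvEmitAll]
      · rw [hSA']
        intro e he
        simp at he
  | succ k hk ih =>
    intro hlen
    have hkn : k < arr.length := by omega
    have hIH := ih (by omega)
    have hak : PySem.List.pyGetD arr ((k : Nat) : Int) 0 = arr[k] := pvGet_nat arr k hkn
    unfold pvInv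
    rw [pvStateA_succ arr m k hk, pvStateB_succ arr m k hkn]
    rw [show ((k + 1 : Nat) : Int) = (k : Int) + 1 by push_cast; ring]
    rw [show (k : Int) + 1 - 1 = (k : Int) by ring]
    by_cases hp : PySem.List.pyGetD arr ((k : Int) - 1) 0 = m
    · obtain ⟨hB, hg⟩ := hIH.2 hp
      by_cases hA : PySem.List.pyGetD arr (k : Int) 0 = m
      · -- both current and previous are the max: nothing changes, B flushes an empty run
        have hstA : pvStepA arr m (pvStateA arr m k) (k : Int) = pvStateA arr m k := by
          unfold pvStepA
          rw [if_neg (by tauto), if_neg (by tauto), if_neg (by tauto)]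
        have hAk : arr[k] = m := by rw [← hak]; exact hA
        have hstB : pvStepB arr m (pvStateB arr m k) ((k : Int), arr[k]) =
            (pvEmitAll arr m (pvStateA arr m k), []) := by
          unfold pvStepB
          rw [if_pos (show ((k : Int), arr[k]).2 = m from hAk), hB]
          simp
        rw [hstA, hstB]
        constructor
        · intro h; exact absurd hA h
        · intro _
          refine ⟨rfl, ?_⟩
          intro e he
          obtain ⟨h1, h2, h3, h4⟩ := hg e he
          exact ⟨h1, h2, by omega, h4⟩
      · -- a new run of length 1 opens at index k
        have hstA : pvStepA arr m (pvStateA arr m k) (k : Int) =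
            pvStateA arr m k ++ [((k : Int), (k : Int))] := by
          unfold pvStepA
          rw [if_neg (by tauto), if_neg (by tauto), if_pos ⟨hA, hp⟩]
        have hAk : arr[k] ≠ m := by rw [← hak]; exact hA
        have hstB : pvStepB arr m (pvStateB arr m k) ((k : Int), arr[k]) =
            (pvEmitAll arr m (pvStateA arr m k), [(k : Int)]) := by
          unfold pvStepB
          rw [if_neg (show ¬ ((k : Int), arr[k]).2 = m from hAk), hB]
          rfl
        rw [hstA, hstB]
        constructor
        · intro _
          refine ⟨pvStateA arr m k, (k : Int), rfl, ?_, ?_, by omega, le_rfl, ?_⟩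
          · rw [PySem.List.pyRange_one_singleton]
          · intro e he
            obtain ⟨h1, h2, h3, h4⟩ := hg e he
            exact ⟨h1, h2, by omega, h4⟩
          · intro j hj1 hj2
            have hj : j = (k : Int) := by omega
            rw [hj]
            exact hA
        · intro h; exact absurd h hA
    · obtain ⟨C, s, hAe, hBe, hg, hs0, hs1, hr⟩ := hIH.1 hp
      by_cases hA : PySem.List.pyGetD arr (k : Int) 0 = m
      · -- the open run closes at k-1; B flushes it reversed
        have hstA : pvStepA arr m (pvStateA arr m k) (k : Int) = C ++ [(s, (k : Int) - 1)] := by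
          unfold pvStepA
          rw [if_pos ⟨hA, hp⟩, hAe, pvSetLast_append]
        have hAk : arr[k] = m := by rw [← hak]; exact hA
        have hstB : pvStepB arr m (pvStateB arr m k) ((k : Int), arr[k]) =
            (pvEmitAll arr m (C ++ [(s, (k : Int) - 1)]), []) := by
          unfold pvStepB
          rw [if_pos (show ((k : Int), arr[k]).2 = m from hAk), hBe, pvEmitAll_append]
          simp only [pvEmitI, pvOp]
          rw [show (k : Int) - 1 + 1 = (k : Int) by ring]
        rw [hstA, hstB]
        constructor
        · intro h; exact absurd hA h
        · intro _
          refine ⟨rfl, ?_⟩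
          intro e he
          rcases List.mem_append.mp he with he' | he'
          · obtain ⟨h1, h2, h3, h4⟩ := hg e he'
            exact ⟨h1, h2, by omega, h4⟩
          · have he2 : e = (s, (k : Int) - 1) := by simpa using he'
            rw [he2]
            exact ⟨hs0, hs1, by omega, hr⟩
      · -- the open run extends to k
        have hstA : pvStepA arr m (pvStateA arr m k) (k : Int) = C ++ [(s, (k : Int))] := by
          unfold pvStepA
          rw [if_neg (by tauto), if_pos ⟨hA, hp⟩, hAe, pvSetLast_append]
        have hAk : arr[k] ≠ m := by rw [← hak]; exact hA
        have hstB : pvStepB arr m (pvStateB arr m k) ((k : Int), arr[k]) =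
            (pvEmitAll arr m C, PySem.List.pyRange s ((k : Int) + 1)) := by
          unfold pvStepB
          rw [if_neg (show ¬ ((k : Int), arr[k]).2 = m from hAk), hBe]
          rw [PySem.List.pyRange_one_succ_right (by omega : s ≤ (k : Int))]
        rw [hstA, hstB]
        constructor
        · intro _
          refine ⟨C, s, rfl, rfl, ?_, hs0, by omega, ?_⟩
          · intro e he
            obtain ⟨h1, h2, h3, h4⟩ := hg e he
            exact ⟨h1, h2, by omega, h4⟩
          · intro j hj1 hj2
            by_cases hjk : j ≤ (k : Int) - 1
            · exact hr j hj1 hjk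
            · have hj : j = (k : Int) := by omega
              rw [hj]
              exact hA
        · intro h; exact absurd h hA

-- Main run-equivalence: for ANY pivot m, A's emission over its empties equals B's single pass.
theorem pvRunEquiv (arr : List Int) (m : Int) (hne : arr ≠ []) :
    (pvStateA arr m arr.length).foldl (fun res e =>
      if e.2 ≠ (arr.length : Int) - 1 then
        ((PySem.List.pyRange e.1 (e.2 + 1)).reverse).foldl (fun r i =>
          if PySem.List.pyGetD arr i 0 > m then r ++ [(2, i + 1, i + 2)]
          else if PySem.List.pyGetD arr i 0 < m then r ++ [(1, i + 1, i + 2)]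
          else r) res
      else
        (PySem.List.pyRange e.1 (e.2 + 1)).foldl (fun r i =>
          if PySem.List.pyGetD arr i 0 > m then r ++ [(2, i + 1, i)]
          else if PySem.List.pyGetD arr i 0 < m then r ++ [(1, i + 1, i)]
          else r) res) [] =
    ((PySem.List.enumerate arr).foldl (pvStepB arr m) ([], [])).1 ++
      ((PySem.List.enumerate arr).foldl (pvStepB arr m) ([], [])).2.map
        (fun j => ((if PySem.List.pyGetD arr j 0 > m then (2 : Int) else 1), j + 1, j)) := by
  have hlen : 1 ≤ arr.length := List.length_pos_of_ne_nil hne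
  have hSB : (PySem.List.enumerate arr).foldl (pvStepB arr m) ([], []) =
      pvStateB arr m arr.length := by
    unfold pvStateB
    rw [← PySem.List.length_enumerate arr 0, List.take_length]
  rw [hSB]
  have hinv := pvInv_holds arr m hne arr.length hlen le_rfl
  by_cases hlast : PySem.List.pyGetD arr ((arr.length : Int) - 1) 0 = m
  · obtain ⟨hB, hg⟩ := hinv.2 hlast
    rw [hB, pvFoldEmitC arr m (pvStateA arr m arr.length) []
      (fun e he => ⟨by obtain ⟨h1, h2, h3, h4⟩ := hg e he; omega,
        (hg e he).2.2.2⟩)]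
    simp
  · obtain ⟨C, s, hA, hB, hg, hs0, hs1, hr⟩ := hinv.1 hlast
    rw [hA, hB, List.foldl_append,
      pvFoldEmitC arr m C []
        (fun e he => ⟨by obtain ⟨h1, h2, h3, h4⟩ := hg e he; omega,
          (hg e he).2.2.2⟩)]
    simp only [List.foldl_cons, List.foldl_nil]
    rw [if_neg (by simp)]
    rw [pvFold3_fwd arr m (s, (arr.length : Int) - 1) _ hr]
    rw [show (arr.length : Int) - 1 + 1 = (arr.length : Int) by ring]
    simp [pvOp]

-- The common frequency dict, and Python's max with key as a strict-greater running fold.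
theorem pvDictEq (arr : List Int) :
    arr.foldl (fun d a =>
      match d.get? a with
      | none => d.insert a 1
      | some c => d.insert a (c + 1)) (PySem.Dict.empty : PySem.Dict Int Int) = PySem.Dict.counter arr := by
  rw [PySem.List.foldl_congr_mem' arr _
      (fun (d : PySem.Dict Int Int) (a : Int) => d.insert a (d.getD a 0 + 1)) PySem.Dict.empty ?_]
  · exact PySem.Dict.foldl_insert_getD_add_one_eq_counter arr
  · intro x _ d
    cases hget : d.get? x with
    | none =>
      dsimp only
      rw [PySem.Dict.getD_of_get?_eq_none d 0 hget]
      norm_num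
    | some c =>
      dsimp only
      rw [PySem.Dict.getD_of_get?_eq_some d 0 hget]

theorem pvMainEq (n : Int) (arr : List Int) (hpre : arr ≠ []) :
    f_py n arr = f_py_alt n arr := by
  simp only [f_py, f_py_alt]
  rw [pvDictEq arr, PySem.Dict.foldl_insert_getD_add_one_eq_counter arr]
  have hkne : (PySem.Dict.counter arr).keys ≠ [] := by
    rw [PySem.Dict.keys_counter]
    obtain ⟨a, t, rfl⟩ := List.exists_cons_of_ne_nil hpre
    exact List.ne_nil_of_mem (by simp : a ∈ PySem.Set.ofList (a :: t))
  obtain ⟨k0, rest, hk⟩ := List.exists_cons_of_ne_nil hkne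
  rw [hk]
  rw [show PySem.List.pyGet? (k0 :: rest) 0 = some k0 from by
    simp [PySem.List.pyGet?, PySem.List.pyIdx?]]
  rw [pv_max?_eq_foldl (k0 :: rest) k0 rest rfl
    (fun k => (PySem.Dict.counter arr).getD k 0)]
  dsimp only
  rw [show (fun (mx k : Int) =>
      if (PySem.Dict.counter arr).getD k 0 > (PySem.Dict.counter arr).getD mx 0 then k else mx) =
      (fun (mx k : Int) =>
      if (PySem.Dict.counter arr).getD mx 0 < (PySem.Dict.counter arr).getD k 0 then k else mx) from
    rfl]
  generalize (List.foldl (fun (mx k : Int) =>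
    if (PySem.Dict.counter arr).getD mx 0 < (PySem.Dict.counter arr).getD k 0 then k else mx)
    k0 (k0 :: rest)) = m
  exact pvRunEquiv arr m hpre

-- ===== VERDICT (by name: the statement is the Claim_ definition above) =====
theorem f_py_spec : Claim_equal_f_py := by
  intro n arr _hdom hpre
  exact pvMainEq n arr hpre
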